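-- pv_equiv track=rewrite | github.com/yochaiz/SmartHome | Reinforcement/Policies/plotPolicy.py | spaceXaxis
-- ===== SOURCE A (Python) =====
-- def spaceXaxis(xTicks, xLabels):
--     minDiff = 300  # value in seconds, i.e. 5 minutes
--     i = 1
--     while i < len(xTicks):
--         diff = xTicks[i] - xTicks[i - 1]
--         if diff < minDiff:
--             del xTicks[i]
--             del xLabels[i]
--         else:
--             i += 1
--
--     return xTicks, xLabels
-- ===== SOURCE B (Python) =====
-- def spaceXaxis(xTicks, xLabels):
--     minDiff = 300  # value in seconds, i.e. 5 minutes
--     keptTicks = []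
--     dropped = set()
--     for i, t in enumerate(xTicks):
--         if keptTicks and t - keptTicks[-1] < minDiff:
--             dropped.add(i)
--         else:
--             keptTicks.append(t)
--     newLabels = [lab for i, lab in enumerate(xLabels) if i not in dropped]
--     return keptTicks, newLabels
-- ===== Notes on version B (the rewrite author's own statement) =====
-- stated objective: faster
-- what changed: Replaces the quadratic while-loop that deletes elements in place (each del shifts the list tail) with one linear pass over enumerate(xTicks) collecting the kept ticks and the set of dropped indices, then a single filter of the labels; Pre_ excludes inputs with more ticks than labels and some gap under 300, where A raises IndexError whenever a dropped tick's index reaches past the labels (on such inputs where A happens to return, B returns the same value).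
-- outside the precondition, e.g. on spaceXaxis([0, 1, 1000], ['a', 'b']): A returns ([0, 1000], ['a']), B returns ([0, 1000], ['a'])
import Mathlib
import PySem

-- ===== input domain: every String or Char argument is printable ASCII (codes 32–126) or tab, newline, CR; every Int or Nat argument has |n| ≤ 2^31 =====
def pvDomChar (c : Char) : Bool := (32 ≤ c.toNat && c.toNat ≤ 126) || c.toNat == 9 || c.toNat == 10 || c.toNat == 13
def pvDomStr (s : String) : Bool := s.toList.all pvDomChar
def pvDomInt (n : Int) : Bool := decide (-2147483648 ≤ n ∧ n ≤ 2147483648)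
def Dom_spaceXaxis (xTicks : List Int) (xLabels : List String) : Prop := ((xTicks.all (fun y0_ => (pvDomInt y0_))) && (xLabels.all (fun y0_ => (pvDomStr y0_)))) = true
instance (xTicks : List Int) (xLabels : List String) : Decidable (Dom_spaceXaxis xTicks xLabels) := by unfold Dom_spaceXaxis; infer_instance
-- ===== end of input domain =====

-- B replaces A's quadratic in-place deletion loop by one linear pass collecting the kept ticks
-- and the dropped indices, then filters the labels once; equivalence is about the RETURN value
-- only (Python A mutates its argument lists in place, B does not).

-- ===== PORT A =====
-- while i < len(xTicks): diff = xTicks[i] - xTicks[i-1]; if diff < 300: del xTicks[i]; del xLabels[i] else i += 1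
-- xTicks[i] / xTicks[i-1] are in range (1 ≤ i < len) so List.getD is exact; del xLabels[i] is
-- List.eraseIdx (exact when i < len(xLabels); otherwise Python raises IndexError — excluded by Pre_).
def spaceXaxisLoop (xTicks : List Int) (xLabels : List String) (i : Nat) : List Int × List String :=
  if h : i < xTicks.length then
    let diff := xTicks.getD i 0 - xTicks.getD (i - 1) 0
    if diff < 300 then
      spaceXaxisLoop (xTicks.eraseIdx i) (xLabels.eraseIdx i) i
    else
      spaceXaxisLoop xTicks xLabels (i + 1)
  else (xTicks, xLabels)
termination_by xTicks.length - i
decreasing_by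
  · simp [List.length_eraseIdx, h]; omega
  · omega

def spaceXaxis (xTicks : List Int) (xLabels : List String) : List Int × List String :=
  spaceXaxisLoop xTicks xLabels 1

-- ===== PORT B =====
-- the for-loop over enumerate(xTicks) carrying keptTicks and the `dropped` index set
def altLoop (kept : List Int) (dropped : PySem.Set Int) : List (Int × Int) → List Int × PySem.Set Int
  | [] => (kept, dropped)
  | (i, t) :: rest =>
    match kept.getLast? with
    | some l =>
      if t - l < 300 then altLoop kept (PySem.Set.add dropped i) rest
      else altLoop (kept ++ [t]) dropped rest
    | none => altLoop (kept ++ [t]) dropped rest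

-- [lab for i, lab in enumerate(xLabels) if i not in dropped]
def spaceXaxis_alt (xTicks : List Int) (xLabels : List String) : List Int × List String :=
  let p := altLoop [] PySem.Set.empty (PySem.List.enumerate xTicks)
  (p.1, (PySem.List.enumerate xLabels).filterMap
          (fun q => if PySem.Set.contains p.2 q.1 then none else some q.2))

-- ===== PRECONDITION & SPEC =====
-- ticks with all consecutive gaps >= 300 (A then deletes nothing)
def spaced : List Int → Bool
  | t1 :: t2 :: r => (300 ≤ t2 - t1) && spaced (t2 :: r)
  | _ => true

-- With more ticks than labels A raises IndexError as soon as a tick whose index reaches past the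
-- labels must be dropped; whether that happens depends on the tick values, so Pre_ conservatively
-- admits the inputs where no such deletion can occur: at least as many labels as ticks, or ticks
-- that are all ≥ 300 apart (then A deletes nothing).  On the excluded inputs where A happens to
-- return, B returns the same value (see the cite).
def Pre_spaceXaxis (xTicks : List Int) (xLabels : List String) : Prop :=
  xTicks.length ≤ xLabels.length ∨ spaced xTicks = true
instance (xTicks : List Int) (xLabels : List String) : Decidable (Pre_spaceXaxis xTicks xLabels) := by unfold Pre_spaceXaxis; infer_instance

def pvWitness_spaceXaxis : List Int × List String := ([0, 100, 500], ["a", "b", "c"])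

def Spec_spaceXaxis (xTicks : List Int) (xLabels : List String) (out : List Int × List String) : Prop := out = spaceXaxis_alt xTicks xLabels
instance (xTicks : List Int) (xLabels : List String) (out : List Int × List String) : Decidable (Spec_spaceXaxis xTicks xLabels out) := by unfold Spec_spaceXaxis; infer_instance

-- ===== CLAIM (what is proved, stated in full; the proofs are below) =====
def Claim_equal_spaceXaxis : Prop := ∀ (xTicks : List Int) (xLabels : List String), Dom_spaceXaxis xTicks xLabels → Pre_spaceXaxis xTicks xLabels → Spec_spaceXaxis xTicks xLabels (spaceXaxis xTicks xLabels)

-- ===== LEMMAS AND PROOFS =====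

-- the keep/drop decision both programs make, as a boolean mask over the ticks
def mask : Option Int → List Int → List Bool
  | _, [] => []
  | none, t :: r => true :: mask (some t) r
  | some l, t :: r => if t - l < 300 then false :: mask (some l) r else true :: mask (some t) r

-- select by mask; elements beyond the mask are kept
def sel {α : Type} : List Bool → List α → List α
  | [], xs => xs
  | _ :: _, [] => []
  | b :: m, x :: xs => if b then x :: sel m xs else sel m xs

-- the indices (from k on) at which the mask is false
def falseIdxs : Option Int → Int → List Int → List Int
  | _, _, [] => []
  | none, k, t :: r => falseIdxs (some t) (k + 1) r
  | some l, k, t :: r =>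
    if t - l < 300 then k :: falseIdxs (some l) (k + 1) r else falseIdxs (some t) (k + 1) r

lemma mask_length (last : Option Int) (R : List Int) : (mask last R).length = R.length := by
  induction R generalizing last with
  | nil => cases last <;> rfl
  | cons t r ih =>
    cases last with
    | none => simpa [mask] using ih (some t)
    | some l => by_cases h : t - l < 300 <;> simp [mask, h, ih]

lemma sel_nil {α : Type} (m : List Bool) : sel m ([] : List α) = [] := by
  cases m <;> rfl

lemma sel_append {α : Type} (m : List Bool) (S E : List α) (h : m.length ≤ S.length) :
    sel m (S ++ E) = sel m S ++ E := by
  induction m generalizing S with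
  | nil => simp [sel]
  | cons b m ih =>
    cases S with
    | nil => simp at h
    | cons s S =>
      by_cases hb : b = true <;>
        simp [sel, hb, ih S (by simpa using h)]

lemma eraseIdx_append_cons {α : Type} (P : List α) (x : α) (l : List α) :
    (P ++ x :: l).eraseIdx P.length = P ++ l := by
  induction P with
  | nil => rfl
  | cons p P ih => simpa using ih

-- A's loop: P/Q settled prefixes, a/b last kept pair, R/S the paired unprocessed tails, E surplus labels
lemma spaceXaxisLoop_eq (R : List Int) (S E : List String) (P : List Int) (Q : List String)
    (a : Int) (b : String) (hS : S.length = R.length) (hQ : Q.length = P.length) :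
    spaceXaxisLoop (P ++ a :: R) (Q ++ b :: (S ++ E)) (P.length + 1) =
      (P ++ a :: sel (mask (some a) R) R,
       Q ++ b :: (sel (mask (some a) R) S ++ E)) := by
  induction R generalizing S P Q a b with
  | nil =>
    rw [List.length_eq_zero_iff.mp (by simpa using hS : S.length = 0)]
    rw [spaceXaxisLoop]
    simp [mask, sel]
  | cons t R ih =>
    obtain ⟨s, S, rfl⟩ : ∃ s S', S = s :: S' := by
      cases S with
      | nil => simp at hS
      | cons s S' => exact ⟨s, S', rfl⟩
    have hlt : P.length + 1 < (P ++ a :: t :: R).length := by simp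
    rw [spaceXaxisLoop, dif_pos hlt]
    have hgt : (P ++ a :: t :: R).getD (P.length + 1) 0 = t := by simp
    have hga : (P ++ a :: t :: R).getD (P.length + 1 - 1) 0 = a := by simp
    simp only [hgt, hga]
    by_cases hd : t - a < 300
    · rw [if_pos hd]
      have e1 : (P ++ a :: t :: R).eraseIdx (P.length + 1) = P ++ a :: R := by
        have := eraseIdx_append_cons (P ++ [a]) t R
        simpa using this
      have e2 : (Q ++ b :: (s :: S ++ E)).eraseIdx (P.length + 1) = Q ++ b :: (S ++ E) := by
        have := eraseIdx_append_cons (Q ++ [b]) s (S ++ E)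
        simpa [hQ] using this
      rw [e1, e2, ih S P Q a b (by simpa using hS) hQ]
      simp [mask, sel, hd]
    · rw [if_neg hd]
      have harr : P ++ a :: t :: R = (P ++ [a]) ++ t :: R := by simp
      have harr2 : Q ++ b :: (s :: S ++ E) = (Q ++ [b]) ++ s :: (S ++ E) := by simp
      have hlen : P.length + 1 + 1 = (P ++ [a]).length + 1 := by simp
      rw [harr, harr2, hlen, ih S (P ++ [a]) (Q ++ [b]) t s (by simpa using hS) (by simp [hQ])]
      simp [mask, sel, hd]

lemma falseIdxs_lb (R : List Int) (last : Option Int) (k j : Int)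
    (hj : j ∈ falseIdxs last k R) : k ≤ j := by
  induction R generalizing last k with
  | nil => cases last <;> simp [falseIdxs] at hj
  | cons t r ih =>
    cases last with
    | none =>
      have := ih (some t) (k + 1) (by simpa [falseIdxs] using hj)
      omega
    | some l =>
      by_cases h : t - l < 300
      · simp only [falseIdxs, if_pos h, List.mem_cons] at hj
        rcases hj with rfl | hj
        · omega
        · have := ih (some l) (k + 1) hj; omega
      · have := ih (some t) (k + 1) (by simpa [falseIdxs, h] using hj)
        omega

-- B's tick loop computes the mask-selected ticks and the false indices
lemma altLoop_eq (R : List Int) : ∀ (k : Int) (kept : List Int) (dropped : List Int),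
    (∀ j ∈ dropped, j < k) →
    altLoop kept dropped (PySem.List.enumerate R k) =
      (kept ++ sel (mask kept.getLast? R) R, dropped ++ falseIdxs kept.getLast? k R) := by
  induction R with
  | nil =>
    intro k kept dropped _
    cases h : kept.getLast? <;> simp [PySem.List.enumerate_nil, altLoop, mask, sel, falseIdxs]
  | cons t r ih =>
    intro k kept dropped hlt
    rw [PySem.List.enumerate_cons]
    cases h : kept.getLast? with
    | none =>
      simp only [altLoop, h]
      rw [ih (k + 1) (kept ++ [t]) dropped (fun j hj => by have := hlt j hj; omega)]
      simp [mask, sel, falseIdxs]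
    | some l =>
      simp only [altLoop, h]
      by_cases hd : t - l < 300
      · rw [if_pos hd]
        have hnotmem : PySem.Set.add dropped k = dropped ++ [k] := by
          have hknm : k ∉ dropped := fun hm => by have := hlt k hm; omega
          simp [PySem.Set.add, PySem.Set.contains, hknm]
        rw [hnotmem, ih (k + 1) kept (dropped ++ [k])
              (fun j hj => by
                rcases List.mem_append.mp hj with hj | hj
                · have := hlt j hj; omega
                · simp at hj; omega)]
        simp [h, mask, sel, falseIdxs, hd]
      · rw [if_neg hd]
        rw [ih (k + 1) (kept ++ [t]) dropped (fun j hj => by have := hlt j hj; omega)]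
        simp [mask, sel, falseIdxs, hd]

lemma mask_cons_none (t : Int) (r : List Int) : mask none (t :: r) = true :: mask (some t) r := rfl

lemma sel_true {α : Type} (m : List Bool) (x : α) (xs : List α) :
    sel (true :: m) (x :: xs) = x :: sel m xs := by simp [sel]

lemma sel_false {α : Type} (m : List Bool) (x : α) (xs : List α) :
    sel (false :: m) (x :: xs) = sel m xs := by simp [sel]

-- head-step lemmas for the label filter
lemma fm_keep {α : Type} (D : List Int) (k : Int) (s : α) (L : List (Int × α)) (h : k ∉ D) :
    ((k, s) :: L).filterMap (fun q => if D.contains q.1 then none else some q.2)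
      = s :: L.filterMap (fun q => if D.contains q.1 then none else some q.2) := by
  simp [List.filterMap_cons, h]

lemma fm_drop {α : Type} (D : List Int) (k : Int) (s : α) (L : List (Int × α)) (h : k ∈ D) :
    ((k, s) :: L).filterMap (fun q => if D.contains q.1 then none else some q.2)
      = L.filterMap (fun q => if D.contains q.1 then none else some q.2) := by
  simp [List.filterMap_cons, h]

-- indices below every element of D never match, so a smaller index can be dropped from the set
lemma filt_cons_irrel {α : Type} (S : List α) (k : Int) (D : List Int) (j : Int)
    (hj : ∀ i ∈ D, k ≤ i) (hjk : j < k) :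
    (PySem.List.enumerate S k).filterMap
        (fun q => if (j :: D).contains q.1 then none else some q.2) =
      (PySem.List.enumerate S k).filterMap
        (fun q => if D.contains q.1 then none else some q.2) := by
  apply List.filterMap_congr
  intro q hq
  obtain ⟨m, hm, rfl⟩ := (PySem.List.mem_enumerate_iff _ _ _).mp hq
  have hne : (k + (m : Int)) ≠ j := by omega
  simp [List.contains_cons, hne]

-- with no dropped indices the filter keeps every label
lemma filt_all_keep {α : Type} (S : List α) : ∀ (k : Int),
    (PySem.List.enumerate S k).filterMap
        (fun q => if ([] : List Int).contains q.1 then none else some q.2) = S := by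
  induction S with
  | nil => intro k; simp [PySem.List.enumerate_nil]
  | cons s S ih =>
    intro k
    rw [PySem.List.enumerate_cons, fm_keep _ _ _ _ (by simp), ih (k + 1)]

-- the label filter against the false-index set is selection by the mask
lemma filt_eq_sel (S : List String) : ∀ (R : List Int) (last : Option Int) (k : Int),
    (PySem.List.enumerate S k).filterMap
        (fun q => if (falseIdxs last k R).contains q.1 then none else some q.2) =
      sel (mask last R) S := by
  induction S with
  | nil => intro R last k; simp [PySem.List.enumerate_nil, sel_nil]
  | cons s S ih =>
    intro R last k
    rw [PySem.List.enumerate_cons]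
    cases R with
    | nil =>
      have h0 : falseIdxs last k ([] : List Int) = [] := by cases last <;> rfl
      have hm : mask last ([] : List Int) = [] := by cases last <;> rfl
      rw [h0, hm, fm_keep _ _ _ _ (by simp), filt_all_keep S (k + 1)]
      rfl
    | cons t r =>
      cases last with
      | none =>
        have hk : k ∉ falseIdxs none k (t :: r) := fun hmem => by
          have := falseIdxs_lb (t :: r) none k k hmem
          have h2 : k ∈ falseIdxs (some t) (k + 1) r := hmem
          have := falseIdxs_lb r (some t) (k + 1) k h2; omega
        rw [fm_keep _ _ _ _ hk]
        simp only [falseIdxs, mask_cons_none]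
        rw [sel_true]
        exact congrArg (fun L => s :: L) (ih r (some t) (k + 1))
      | some l =>
        by_cases hd : t - l < 300
        · have hk : k ∈ falseIdxs (some l) k (t :: r) := by
            simp only [falseIdxs, if_pos hd]
            exact List.mem_cons_self
          rw [fm_drop _ _ _ _ hk]
          simp only [falseIdxs, if_pos hd, mask]
          rw [filt_cons_irrel S (k + 1) (falseIdxs (some l) (k + 1) r) k
                (fun i hi => falseIdxs_lb r (some l) (k + 1) i hi) (by omega)]
          rw [sel_false]
          exact ih r (some l) (k + 1)
        · have hk : k ∉ falseIdxs (some l) k (t :: r) := fun hmem => by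
            rw [show falseIdxs (some l) k (t :: r) = falseIdxs (some t) (k + 1) r by
                  simp [falseIdxs, hd]] at hmem
            have := falseIdxs_lb r (some t) (k + 1) k hmem; omega
          rw [fm_keep _ _ _ _ hk]
          simp only [falseIdxs, if_neg hd, mask]
          rw [sel_true]
          exact congrArg (fun L => s :: L) (ih r (some t) (k + 1))

-- B in closed form
lemma alt_closed (xTicks : List Int) (xLabels : List String) :
    spaceXaxis_alt xTicks xLabels =
      (sel (mask none xTicks) xTicks, sel (mask none xTicks) xLabels) := by
  unfold spaceXaxis_alt
  rw [show PySem.Set.empty = ([] : List Int) from rfl]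
  rw [altLoop_eq xTicks 0 [] [] (by simp)]
  simp only [List.nil_append, List.getLast?_nil]
  exact congrArg₂ Prod.mk rfl (filt_eq_sel xLabels xTicks none 0)

-- A's loop deletes nothing when consecutive ticks are ≥ 300 apart
lemma loop_nodrop (R : List Int) : ∀ (P : List Int) (a : Int) (labels : List String),
    spaced (a :: R) = true →
    spaceXaxisLoop (P ++ a :: R) labels (P.length + 1) = (P ++ a :: R, labels) := by
  induction R with
  | nil =>
    intro P a labels _
    rw [spaceXaxisLoop]
    simp
  | cons t r ih =>
    intro P a labels hch
    have h1 : 300 ≤ t - a := by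
      have := hch
      simp only [spaced, Bool.and_eq_true, decide_eq_true_eq] at this
      exact this.1
    have h2 : spaced (t :: r) = true := by
      simp only [spaced, Bool.and_eq_true] at hch
      exact hch.2
    have hlt : P.length + 1 < (P ++ a :: t :: r).length := by simp
    rw [spaceXaxisLoop, dif_pos hlt]
    have hgt : (P ++ a :: t :: r).getD (P.length + 1) 0 = t := by simp
    have hga : (P ++ a :: t :: r).getD (P.length + 1 - 1) 0 = a := by simp
    simp only [hgt, hga]
    rw [if_neg (by omega)]
    have harr : P ++ a :: t :: r = (P ++ [a]) ++ t :: r := by simp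
    have hlen : P.length + 1 + 1 = (P ++ [a]).length + 1 := by simp
    rw [harr, hlen, ih (P ++ [a]) t labels h2]

-- under the same spacing condition the mask is all-true, so sel is the identity
lemma sel_mask_spaced {α : Type} (R : List Int) : ∀ (a : Int) (xs : List α),
    spaced (a :: R) = true →
    sel (mask (some a) R) xs = xs := by
  induction R with
  | nil => intro a xs _; simp [mask, sel]
  | cons t r ih =>
    intro a xs hch
    simp only [spaced, Bool.and_eq_true, decide_eq_true_eq] at hch
    cases xs with
    | nil => simp [mask, sel, show ¬ (t - a < 300) by omega, sel_nil]
    | cons x xs =>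
      simp only [mask, if_neg (show ¬ (t - a < 300) by omega)]
      rw [sel_true, ih t xs hch.2]

-- the same from an empty last value
lemma sel_mask_spaced0 {α : Type} (ticks : List Int) (xs : List α)
    (h : spaced ticks = true) : sel (mask none ticks) xs = xs := by
  cases ticks with
  | nil => simp [mask, sel]
  | cons a R =>
    cases xs with
    | nil => exact sel_nil _
    | cons x xs =>
      rw [mask_cons_none, sel_true, sel_mask_spaced R a xs h]

-- ===== VERDICT (by name: the statement is the Claim_ definition above) =====
theorem spaceXaxis_spec : Claim_equal_spaceXaxis := by
  intro xTicks xLabels _hDom hPre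
  unfold Spec_spaceXaxis spaceXaxis
  rw [alt_closed]
  cases xTicks with
  | nil =>
    rw [spaceXaxisLoop]
    simp [mask, sel]
  | cons a R =>
    rcases hPre with hPre | hch
    · obtain ⟨b, rest, rfl⟩ : ∃ b rest, xLabels = b :: rest := by
        cases xLabels with
        | nil => simp at hPre
        | cons b rest => exact ⟨b, rest, rfl⟩
      have hRlen : R.length ≤ rest.length := by simpa using hPre
      have hsplit : rest = rest.take R.length ++ rest.drop R.length :=
        (List.take_append_drop _ _).symm
      have hlen : (rest.take R.length).length = R.length := by simp [hRlen]
      have key := spaceXaxisLoop_eq R (rest.take R.length) (rest.drop R.length) [] [] a b hlen rfl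
      simp only [List.nil_append, List.length_nil, Nat.zero_add] at key
      rw [← hsplit] at key
      rw [key, mask_cons_none, sel_true, sel_true]
      have hsel : sel (mask (some a) R) rest
          = sel (mask (some a) R) (rest.take R.length) ++ rest.drop R.length := by
        conv_lhs => rw [hsplit]
        rw [sel_append _ _ _ (le_of_eq (by rw [mask_length, hlen]))]
      rw [hsel]
    · have key := loop_nodrop R [] a xLabels hch
      simp only [List.nil_append, List.length_nil, Nat.zero_add] at key
      rw [key, sel_mask_spaced0 _ _ hch, sel_mask_spaced0 _ _ hch]
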